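-- pv_equiv track=rewrite | github.com/nengler1/qrcode_generator | qrcode_reader.py | pad_bytes
-- ===== SOURCE A (Python) =====
-- def pad_bytes(encoded_str):
--     num_pad = (440 - len(encoded_str)) // 8 # 440 is the total number of codewords for 3-L
--
--     padding = ""
--     for i in range(num_pad):
--         if i % 2 == 0:
--             padding += "11101100" # 236
--         else:
--             padding += "00010001" # 17
--
--     return padding
-- ===== SOURCE B (Python) =====
-- def pad_bytes(encoded_str):
--     num_pad = (440 - len(encoded_str)) // 8  # 440 is the total number of codewords for 3-L
--     n = max(0, num_pad)
--     # closed form: repeat the two-byte block, plus one odd block if needed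
--     return "1110110000010001" * (n // 2) + ("11101100" if n % 2 == 1 else "")
-- ===== Notes on version B (the rewrite author's own statement) =====
-- stated objective: alternative
-- what changed: Replaces the index loop with a per-iteration parity branch by a closed-form construction: the 16-bit block repeated num_pad//2 times plus one odd block, with an explicit clamp to 0.
import Mathlib
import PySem

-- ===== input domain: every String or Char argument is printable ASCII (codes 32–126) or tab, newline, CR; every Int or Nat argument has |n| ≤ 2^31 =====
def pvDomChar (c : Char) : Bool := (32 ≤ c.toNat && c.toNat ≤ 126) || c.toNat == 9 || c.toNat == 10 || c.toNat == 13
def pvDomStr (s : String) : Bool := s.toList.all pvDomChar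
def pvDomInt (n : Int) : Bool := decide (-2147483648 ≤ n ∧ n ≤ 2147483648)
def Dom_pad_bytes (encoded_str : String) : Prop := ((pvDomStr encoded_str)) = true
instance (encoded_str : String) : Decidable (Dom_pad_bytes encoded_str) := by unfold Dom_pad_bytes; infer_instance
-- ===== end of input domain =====

-- B replaces A's index loop (parity branch each iteration) by a clamped closed form:
-- the 16-bit block repeated num_pad//2 times plus one odd 8-bit block; alternative, same cost.

-- ===== PORT A =====
def pad_bytes (encoded_str : String) : String :=
  let num_pad := PySem.Int.floordiv (440 - PySem.Str.len encoded_str) 8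
  (PySem.List.pyRange 0 num_pad 1).foldl
    (fun padding i =>
      if PySem.Int.mod i 2 = 0 then padding ++ "11101100" else padding ++ "00010001") ""

-- ===== PORT B =====
-- port of Python's  s * k  on strings (string repetition)
def strRepeat (s : String) : Nat → String
  | 0 => ""
  | k + 1 => strRepeat s k ++ s

def pad_bytes_alt (encoded_str : String) : String :=
  let num_pad := PySem.Int.floordiv (440 - PySem.Str.len encoded_str) 8
  let n := max 0 num_pad
  strRepeat "1110110000010001" (PySem.Int.floordiv n 2).toNat ++
    (if PySem.Int.mod n 2 = 1 then "11101100" else "")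

-- ===== PRECONDITION & SPEC =====
def Spec_pad_bytes (encoded_str : String) (out : String) : Prop := out = pad_bytes_alt encoded_str
instance (encoded_str : String) (out : String) : Decidable (Spec_pad_bytes encoded_str out) := by unfold Spec_pad_bytes; infer_instance

-- ===== CLAIM (what is proved, stated in full; the proofs are below) =====
def Claim_equal_pad_bytes : Prop := ∀ (encoded_str : String), Dom_pad_bytes encoded_str → Spec_pad_bytes encoded_str (pad_bytes encoded_str)

-- ===== LEMMAS AND PROOFS =====

lemma loop_closed_form (m : Nat) :
    (PySem.List.pyRange 0 (m : Int) 1).foldl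
      (fun padding i =>
        if PySem.Int.mod i 2 = 0 then padding ++ "11101100" else padding ++ "00010001") "" =
    strRepeat "1110110000010001" (m / 2) ++ (if m % 2 = 1 then "11101100" else "") := by
  induction m with
  | zero => simp [PySem.List.pyRange_one_eq_nil, strRepeat]
  | succ k ih =>
    have h : ((k : Int) + 1) = ((k + 1 : Nat) : Int) := by push_cast; ring
    rw [show ((k + 1 : Nat) : Int) = (k : Int) + 1 by push_cast; ring,
        PySem.List.pyRange_one_succ_right (by positivity), List.foldl_append, ih]
    simp only [List.foldl_cons, List.foldl_nil]
    have hmod : PySem.Int.mod (k : Int) 2 = ((k % 2 : Nat) : Int) := PySem.Int.mod_natCast k 2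
    rcases Nat.even_or_odd k with he | ho
    · have h2 : k % 2 = 0 := Nat.even_iff.mp he
      have hs : (k + 1) % 2 = 1 := by omega
      have hd : (k + 1) / 2 = k / 2 := by omega
      have hdvd : (2:Int) ∣ (k:Int) := Int.natCast_dvd_natCast.mpr (Nat.dvd_of_mod_eq_zero h2)
      simp [h2, hs, hd, hdvd]
    · have h2 : k % 2 = 1 := Nat.odd_iff.mp ho
      have hs : (k + 1) % 2 = 0 := by omega
      have hd : (k + 1) / 2 = k / 2 + 1 := by omega
      simp only [hmod, h2, hs, hd]
      norm_num
      rw [String.append_assoc]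
      rfl

lemma closed_form_all (np : Int) :
    (PySem.List.pyRange 0 np 1).foldl
      (fun padding i =>
        if PySem.Int.mod i 2 = 0 then padding ++ "11101100" else padding ++ "00010001") "" =
    strRepeat "1110110000010001" (PySem.Int.floordiv (max 0 np) 2).toNat ++
      (if PySem.Int.mod (max 0 np) 2 = 1 then "11101100" else "") := by
  by_cases h : np ≤ 0
  · have hmax : max 0 np = 0 := by omega
    rw [PySem.List.pyRange_one_eq_nil h, hmax]
    simp [PySem.Int.floordiv, PySem.Int.mod, strRepeat]
  · have hmax : max 0 np = np := by omega
    obtain ⟨m, hm⟩ : ∃ m : Nat, np = (m : Int) := ⟨np.toNat, (Int.toNat_of_nonneg (by omega)).symm⟩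
    have hfd : PySem.Int.floordiv (m : Int) 2 = ((m / 2 : Nat) : Int) := by
      exact_mod_cast PySem.Int.floordiv_natCast m 2
    have hmd : PySem.Int.mod (m : Int) 2 = ((m % 2 : Nat) : Int) := by
      exact_mod_cast PySem.Int.mod_natCast m 2
    rw [hmax, hm, loop_closed_form m, hfd, hmd, Int.toNat_natCast]
    rcases Nat.even_or_odd m with he | ho
    · simp [Nat.even_iff.mp he]
    · simp [Nat.odd_iff.mp ho]

theorem pad_bytes_spec : Claim_equal_pad_bytes := by
  intro s _
  exact closed_form_all (PySem.Int.floordiv (440 - PySem.Str.len s) 8)
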